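-- pv_equiv track=rewrite | github.com/MohaHtn/puissance_4 | Rendu Intermédiaire/connect_4.py | is_align4
-- ===== SOURCE A (Python) =====
-- def nr(grille):
--     """
--     Retourne le nombre de lignes de la grille.
--     :param grille: (list) une grille
--     :return: (int) le nombre de lignes de la grille
--     """
--     return len(grille)
--
-- def nc(grille):
--     """
--     Retourne le nombre de colonnes de la grille.
--     :param grille: (list) une grille
--     :return: (int) le nombre de colonnes de la grille
--     """
--     return len(grille[0])
--
-- def is_in_range(g, r, c):
--     """
--     Vérifie si le jeton est dans la ligne r, dans la grille g.
--     :param g: (list) La grille de jeu.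
--     :param r: (int) La ligne de la grille.
--     :param c: (int) la colonne de la grille.
--     :return: (bool) Vrai ou Faux suivant si le jeton est dans la grille.
--     """
--     if nr(g) > r and nc(g) > c and r >= 0 and c >= 0:
--         return True
--     else:
--         return False
--
-- def is_align4(grille, lc, p):
--     """
--     Vérifie si la
--     :param grille:
--     :param lc:
--     :param p:
--     :return:
--     """
--     lc = list(filter(lambda coord: is_in_range(grille, coord[0], coord[1]), lc))
--     nbConsecutif = 0
--
--     for coord in lc:                                        # Tuple (r,c)
--         jeton = grille[coord[0]][coord[1]]
--         if (jeton == p):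
--             nbConsecutif += 1
--         else:
--             nbConsecutif = 0
--         last = jeton
--         if nbConsecutif == 4:
--             return True
--     return False
-- ===== SOURCE B (Python) =====
-- def is_align4(grille, lc, p):
--     rows = len(grille)
--     cols = len(grille[0]) if grille else 0
--     tokens = [grille[r][c] for (r, c) in lc
--               if 0 <= r < rows and 0 <= c < cols]
--     idxs = [i for i, t in enumerate(tokens) if t == p]
--     return any(idxs[j + 3] == idxs[j] + 3 for j in range(len(idxs) - 3))
-- ===== Notes on version B (the rewrite author's own statement) =====
-- stated objective: alternative
-- what changed: Instead of scanning tokens with a reset-on-mismatch running counter, B collects the list of positions where the token equals p and decides alignment by a gap test on that index list: four p-positions are consecutive iff idxs[j+3] == idxs[j] + 3 for some j.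
import Mathlib
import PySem

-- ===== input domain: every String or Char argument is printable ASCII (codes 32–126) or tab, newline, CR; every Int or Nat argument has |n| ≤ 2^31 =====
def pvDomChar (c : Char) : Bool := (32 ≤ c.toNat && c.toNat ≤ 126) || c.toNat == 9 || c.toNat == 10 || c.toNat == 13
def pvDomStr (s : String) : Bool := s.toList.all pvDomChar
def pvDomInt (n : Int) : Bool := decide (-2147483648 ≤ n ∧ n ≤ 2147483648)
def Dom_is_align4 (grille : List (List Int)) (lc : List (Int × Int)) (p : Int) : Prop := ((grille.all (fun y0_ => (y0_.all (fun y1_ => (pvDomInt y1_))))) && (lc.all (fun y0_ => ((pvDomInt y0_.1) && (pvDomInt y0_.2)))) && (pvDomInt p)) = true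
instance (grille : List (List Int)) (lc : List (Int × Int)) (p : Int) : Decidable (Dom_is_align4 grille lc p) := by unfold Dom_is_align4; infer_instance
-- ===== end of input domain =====

-- B replaces A's reset-on-mismatch running counter by a position-list strategy: it
-- collects the indices of the in-range tokens equal to p and tests the gap
-- idxs[j+3] == idxs[j] + 3; same O(n) cost, a genuinely different decomposition.

-- ===== PORT A =====
-- is_in_range(g, r, c): nr(g) > r and nc(g) > c and r >= 0 and c >= 0
-- (nc(g) = len(g[0]); on Pre_ it is only reached with g nonempty, so headD is exact there)
def pyIsInRange (g : List (List Int)) (r c : Int) : Bool :=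
  decide ((g.length : Int) > r) && decide (((g.headD []).length : Int) > c) &&
  decide (r ≥ 0) && decide (c ≥ 0)

-- the for-loop over the filtered coords with the running counter nbConsecutif
def loopA (g : List (List Int)) (p : Int) : List (Int × Int) → Int → Bool
  | [], _ => false
  | coord :: rest, nb =>
    let jeton := (PySem.List.pyGet? ((PySem.List.pyGet? g coord.1).getD []) coord.2).getD 0
    let nb' := if jeton == p then nb + 1 else 0
    if nb' == 4 then true else loopA g p rest nb'

def is_align4 (grille : List (List Int)) (lc : List (Int × Int)) (p : Int) : Bool :=
  loopA grille p (lc.filter (fun coord => pyIsInRange grille coord.1 coord.2)) 0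

-- ===== PORT B =====
-- tokens = [grille[r][c] for (r, c) in lc if 0 <= r < rows and 0 <= c < cols]
-- idxs = [i for i, t in enumerate(tokens) if t == p]
-- any(idxs[j + 3] == idxs[j] + 3 for j in range(len(idxs) - 3))
-- (idxs[j] / idxs[j+3] are always in range there, so pyGetD is exact)
def is_align4_alt (grille : List (List Int)) (lc : List (Int × Int)) (p : Int) : Bool :=
  let rows : Int := grille.length
  let cols : Int := if grille.isEmpty then 0 else ((grille.headD []).length : Int)
  let tokens : List Int :=
    (lc.filter (fun rc =>
        decide (0 ≤ rc.1) && decide (rc.1 < rows) &&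
        decide (0 ≤ rc.2) && decide (rc.2 < cols))).map
      (fun rc => (PySem.List.pyGet? ((PySem.List.pyGet? grille rc.1).getD []) rc.2).getD 0)
  let idxs : List Int :=
    ((PySem.List.enumerate tokens 0).filter (fun it => it.2 == p)).map (·.1)
  (PySem.List.pyRange 0 ((idxs.length : Int) - 3) 1).any (fun j =>
    PySem.List.pyGetD idxs (j + 3) 0 == PySem.List.pyGetD idxs j 0 + 3)

-- ===== PRECONDITION & SPEC =====
-- Pre_ excludes exactly the inputs on which Python A raises IndexError: an empty grille
-- together with a negative row coordinate (nc(g) evaluates grille[0]), and an in-range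
-- coordinate whose actual row is shorter than the first row (grille[r][c] out of range).
def Pre_is_align4 (grille : List (List Int)) (lc : List (Int × Int)) (p : Int) : Prop :=
  (grille = [] → ∀ rc ∈ lc, 0 ≤ rc.1) ∧
  (∀ rc ∈ lc, (0 ≤ rc.1 ∧ rc.1 < (grille.length : Int) ∧ 0 ≤ rc.2 ∧
      rc.2 < ((grille.headD []).length : Int)) →
    rc.2 < ((grille.getD rc.1.toNat []).length : Int))
instance (grille : List (List Int)) (lc : List (Int × Int)) (p : Int) : Decidable (Pre_is_align4 grille lc p) := by unfold Pre_is_align4; infer_instance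

def pvWitness_is_align4 : List (List Int) × (List (Int × Int)) × Int :=
  ([[0, 1], [1, 0]], [((0 : Int), (0 : Int)), (0, 1)], 1)

def Spec_is_align4 (grille : List (List Int)) (lc : List (Int × Int)) (p : Int) (out : Bool) : Prop := out = is_align4_alt grille lc p
instance (grille : List (List Int)) (lc : List (Int × Int)) (p : Int) (out : Bool) : Decidable (Spec_is_align4 grille lc p out) := by unfold Spec_is_align4; infer_instance

-- ===== CLAIM (what is proved, stated in full; the proofs are below) =====
def Claim_equal_is_align4 : Prop := ∀ (grille : List (List Int)) (lc : List (Int × Int)) (p : Int), Dom_is_align4 grille lc p → Pre_is_align4 grille lc p → Spec_is_align4 grille lc p (is_align4 grille lc p)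


-- ===== LEMMAS AND PROOFS =====

-- the window spec both programs are proved against: somewhere 4 consecutive tokens are p
def Wp (p : Int) (ts : List Int) : Prop := ∃ i : Nat, (ts.drop i).take 4 = [p, p, p, p]

-- ---- A-side: the counter loop, re-read on the token sequence ----
def loopT (p : Int) : List Int → Int → Bool
  | [], _ => false
  | t :: ts, nb =>
    let nb' := if t == p then nb + 1 else 0
    if nb' == 4 then true else loopT p ts nb'

lemma loopA_eq_loopT (g : List (List Int)) (p : Int) (cds : List (Int × Int)) (nb : Int) :
    loopA g p cds nb =
      loopT p (cds.map (fun rc => (PySem.List.pyGet? ((PySem.List.pyGet? g rc.1).getD []) rc.2).getD 0)) nb := by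
  induction cds generalizing nb with
  | nil => rfl
  | cons c rest ih =>
    simp only [loopA, loopT, List.map_cons]
    split <;> simp [ih]

lemma filterA_eq_filterB (g : List (List Int)) (lc : List (Int × Int)) :
    lc.filter (fun coord => pyIsInRange g coord.1 coord.2) =
    lc.filter (fun rc =>
      decide (0 ≤ rc.1) && decide (rc.1 < (g.length : Int)) &&
      decide (0 ≤ rc.2) && decide (rc.2 < ((g.headD []).length : Int))) := by
  apply List.filter_congr
  intro rc _
  rw [Bool.eq_iff_iff]
  simp only [pyIsInRange, Bool.and_eq_true, decide_eq_true_eq]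
  constructor <;> intro h <;> omega

lemma W_cons (p x : Int) (xs : List Int) :
    Wp p (x :: xs) ↔ (x :: xs).take 4 = [p, p, p, p] ∨ Wp p xs := by
  constructor
  · rintro ⟨i, h⟩
    cases i with
    | zero => exact Or.inl (by simpa using h)
    | succ i' => exact Or.inr ⟨i', by simpa using h⟩
  · rintro (h | ⟨i, h⟩)
    · exact ⟨0, by simpa using h⟩
    · exact ⟨i + 1, by simpa using h⟩

lemma W_length (p : Int) (ts : List Int) (h : Wp p ts) : 4 ≤ ts.length := by
  obtain ⟨i, h⟩ := h
  have := congrArg List.length h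
  simp at this
  omega

-- a short block of p's followed by a non-p token contributes nothing
lemma W_skip (p x : Int) (ts : List Int) (n : Nat) (hn : n ≤ 3) (hx : ¬ x = p) :
    Wp p (List.replicate n p ++ x :: ts) ↔ Wp p ts := by
  interval_cases n <;>
    simp [List.replicate, W_cons, hx, List.take_succ_cons]

lemma loopT_iff (p : Int) : ∀ (ts : List Int) (nb : Int), 0 ≤ nb → nb ≤ 3 →
    (loopT p ts nb = true ↔ Wp p (List.replicate nb.toNat p ++ ts)) := by
  intro ts
  induction ts with
  | nil =>
    intro nb h0 h3
    simp only [loopT]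
    constructor
    · intro h; exact absurd h (by simp)
    · intro h
      have := W_length p _ h
      simp at this
      omega
  | cons t ts ih =>
    intro nb h0 h3
    by_cases ht : t = p
    · by_cases h4 : nb = 3
      · subst h4
        have hA : loopT p (t :: ts) 3 = true := by simp [loopT, ht]
        rw [hA]
        simp only [true_iff]
        exact ⟨0, by simp [List.replicate, ht]⟩
      · have h4' : (nb + 1 == (4 : Int)) = false := by simp; omega
        have hstep : loopT p (t :: ts) nb = loopT p ts (nb + 1) := by
          simp [loopT, ht, h4']
        rw [hstep, ih (nb + 1) (by omega) (by omega)]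
        have hrep : List.replicate (nb + 1).toNat p ++ ts =
            List.replicate nb.toNat p ++ t :: ts := by
          have h1 : (nb + 1).toNat = nb.toNat + 1 := by omega
          rw [h1, List.replicate_succ']
          simp [ht]
        rw [hrep]
    · have hstep : loopT p (t :: ts) nb = loopT p ts 0 := by
        simp [loopT, ht]
      rw [hstep, ih 0 (by omega) (by omega)]
      simp only [Int.toNat_zero, List.replicate, List.nil_append]
      exact (W_skip p t ts nb.toNat (by omega) ht).symm

lemma loopT_zero_iff (p : Int) (ts : List Int) : loopT p ts 0 = true ↔ Wp p ts := by
  simpa using loopT_iff p ts 0 (by omega) (by omega)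

-- ---- B-side: the position list of p-tokens ----
def posP (p : Int) : List Int → Int → List Int
  | [], _ => []
  | t :: ts, s => if t = p then s :: posP p ts (s + 1) else posP p ts (s + 1)

lemma pos_ge (p : Int) : ∀ (ts : List Int) (s j : Int), j ∈ posP p ts s → s ≤ j := by
  intro ts
  induction ts with
  | nil => intro s j h; simp [posP] at h
  | cons t ts ih =>
    intro s j h
    simp only [posP] at h
    split at h
    · rcases List.mem_cons.mp h with h | h
      · omega
      · have := ih (s + 1) j h; omega
    · have := ih (s + 1) j h; omega

lemma pos_sorted (p : Int) : ∀ (ts : List Int) (s : Int), (posP p ts s).Pairwise (· < ·) := by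
  intro ts
  induction ts with
  | nil => intro s; simp [posP]
  | cons t ts ih =>
    intro s
    simp only [posP]
    split
    · exact List.Pairwise.cons (fun j hj => by have := pos_ge p ts (s + 1) j hj; omega) (ih (s + 1))
    · exact ih (s + 1)

lemma pos_mem (p : Int) : ∀ (ts : List Int) (s j : Int),
    j ∈ posP p ts s ↔ ∃ k : Nat, j = s + k ∧ ts[k]? = some p := by
  intro ts
  induction ts with
  | nil => intro s j; simp [posP]
  | cons t ts ih =>
    intro s j
    simp only [posP]
    constructor
    · intro h
      split at h
      · rcases List.mem_cons.mp h with h | h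
        · exact ⟨0, by simpa using h, by simp [*]⟩
        · obtain ⟨k, hk1, hk2⟩ := (ih (s + 1) j).mp h
          exact ⟨k + 1, by omega, by simpa using hk2⟩
      · obtain ⟨k, hk1, hk2⟩ := (ih (s + 1) j).mp h
        exact ⟨k + 1, by omega, by simpa using hk2⟩
    · rintro ⟨k, hk1, hk2⟩
      cases k with
      | zero =>
        simp only [List.getElem?_cons_zero, Option.some_inj] at hk2
        simp [hk2, hk1]
      | succ k' =>
        simp only [List.getElem?_cons_succ] at hk2
        have : j ∈ posP p ts (s + 1) := (ih (s + 1) j).mpr ⟨k', by omega, hk2⟩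
        split <;> simp [this]

lemma idxs_eq_pos (p : Int) : ∀ (ts : List Int) (s : Int),
    ((PySem.List.enumerate ts s).filter (fun it => it.2 == p)).map (·.1) = posP p ts s := by
  intro ts
  induction ts with
  | nil => intro s; simp [PySem.List.enumerate_nil, posP]
  | cons t ts ih =>
    intro s
    rw [PySem.List.enumerate_cons]
    by_cases ht : t = p <;> simp [posP, ht, ih (s + 1)]

-- the window spec read through getElem?
lemma Wget (p : Int) (ts : List Int) :
    Wp p ts ↔ ∃ i : Nat, ts[i]? = some p ∧ ts[i+1]? = some p ∧
      ts[i+2]? = some p ∧ ts[i+3]? = some p := by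
  constructor
  · rintro ⟨i, h⟩
    refine ⟨i, ?_, ?_, ?_, ?_⟩ <;>
    · have h0 := congrArg (fun l => l[0]?) h
      have h1 := congrArg (fun l => l[1]?) h
      have h2 := congrArg (fun l => l[2]?) h
      have h3 := congrArg (fun l => l[3]?) h
      simp only [List.getElem?_take, List.getElem?_drop] at h0 h1 h2 h3
      simp_all
  · rintro ⟨i, h0, h1, h2, h3⟩
    refine ⟨i, ?_⟩
    have hlen : i + 4 ≤ ts.length := by
      by_contra hc
      rw [List.getElem?_eq_none (by omega)] at h3
      exact absurd h3 (by simp)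
    apply List.ext_getElem?
    intro n
    rcases Nat.lt_or_ge n 4 with hn | hn
    · rw [List.getElem?_take_of_lt hn, List.getElem?_drop]
      interval_cases n <;> simp_all
    · rw [List.getElem?_eq_none (by simp; omega), List.getElem?_eq_none (by simp; omega)]

-- strictly increasing lists: index differences bound value differences (getD form)
lemma sorted_getD_lt (l : List Int) (hs : l.Pairwise (· < ·)) (a b : Nat)
    (hab : a < b) (hb : b < l.length) : l.getD a 0 < l.getD b 0 := by
  rw [List.getD_eq_getElem l 0 (by omega), List.getD_eq_getElem l 0 hb]
  exact List.pairwise_iff_getElem.mp hs a b (by omega) hb hab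

lemma sorted_getD_le (l : List Int) (hs : l.Pairwise (· < ·)) (a b : Nat)
    (hab : a ≤ b) (hb : b < l.length) : l.getD a 0 ≤ l.getD b 0 := by
  rcases Nat.lt_or_ge a b with h | h
  · exact le_of_lt (sorted_getD_lt l hs a b h hb)
  · have : a = b := by omega
    rw [this]

lemma sorted_getD_add (l : List Int) (hs : l.Pairwise (· < ·)) (a : Nat) :
    ∀ k : Nat, a + k < l.length → l.getD a 0 + k ≤ l.getD (a + k) 0 := by
  intro k
  induction k with
  | zero => intro _; simp
  | succ k ih =>
    intro h
    have h1 : l.getD (a + k) 0 < l.getD (a + k + 1) 0 :=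
      sorted_getD_lt l hs (a + k) (a + k + 1) (by omega) (by omega)
    have h2 := ih (by omega)
    have he : a + (k + 1) = a + k + 1 := by omega
    rw [he]
    push_cast
    omega

-- B's gap test over the position list decides the window spec
lemma idx_iff (p : Int) (ts : List Int) :
    ((PySem.List.pyRange 0 (((posP p ts 0).length : Int) - 3) 1).any (fun j =>
      PySem.List.pyGetD (posP p ts 0) (j + 3) 0 == PySem.List.pyGetD (posP p ts 0) j 0 + 3)) = true
    ↔ Wp p ts := by
  set l := posP p ts 0 with hl
  have hsort : l.Pairwise (· < ·) := pos_sorted p ts 0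
  have hmem : ∀ j : Int, j ∈ l ↔ ∃ k : Nat, j = (k : Int) ∧ ts[k]? = some p := by
    intro j; simpa using pos_mem p ts 0 j
  rw [List.any_eq_true]
  constructor
  · rintro ⟨j, hjmem, hj⟩
    rw [PySem.List.mem_pyRange_one] at hjmem
    obtain ⟨hj0, hjlt⟩ := hjmem
    obtain ⟨n, rfl⟩ : ∃ n : Nat, j = (n : Int) := ⟨j.toNat, by omega⟩
    have hlen : n + 3 < l.length := by omega
    rw [beq_iff_eq, show ((n : Int) + 3) = ((n + 3 : Nat) : Int) by push_cast; ring,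
      PySem.List.pyGetD_natCast, PySem.List.pyGetD_natCast] at hj
    -- the four entries l[n], l[n+1], l[n+2], l[n+3] are forced consecutive
    have e1 : l.getD n 0 < l.getD (n + 1) 0 := sorted_getD_lt l hsort _ _ (by omega) (by omega)
    have e2 : l.getD (n + 1) 0 < l.getD (n + 2) 0 := sorted_getD_lt l hsort _ _ (by omega) (by omega)
    have e3 : l.getD (n + 2) 0 < l.getD (n + 3) 0 := sorted_getD_lt l hsort _ _ (by omega) (by omega)
    have hm : ∀ a : Nat, a < l.length → l.getD a 0 ∈ l := by
      intro a ha
      rw [List.getD_eq_getElem l 0 ha]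
      exact List.getElem_mem _
    obtain ⟨k0, hk0, hp0⟩ := (hmem _).mp (hm n (by omega))
    obtain ⟨k1, hk1, hp1⟩ := (hmem _).mp (hm (n + 1) (by omega))
    obtain ⟨k2, hk2, hp2⟩ := (hmem _).mp (hm (n + 2) (by omega))
    obtain ⟨k3, hk3, hp3⟩ := (hmem _).mp (hm (n + 3) (by omega))
    rw [Wget]
    refine ⟨k0, hp0, ?_, ?_, ?_⟩
    · have hk : k1 = k0 + 1 := by omega
      rwa [← hk]
    · have hk : k2 = k0 + 2 := by omega
      rwa [← hk]
    · have hk : k3 = k0 + 3 := by omega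
      rwa [← hk]
  · intro hW
    rw [Wget] at hW
    obtain ⟨i, h0, h1, h2, h3⟩ := hW
    have m0 : ((i : Int)) ∈ l := (hmem _).mpr ⟨i, rfl, h0⟩
    have m1 : ((i : Int) + 1) ∈ l := (hmem _).mpr ⟨i + 1, by push_cast; ring, h1⟩
    have m2 : ((i : Int) + 2) ∈ l := (hmem _).mpr ⟨i + 2, by push_cast; ring, h2⟩
    have m3 : ((i : Int) + 3) ∈ l := (hmem _).mpr ⟨i + 3, by push_cast; ring, h3⟩
    -- turn membership into positions with getD values
    have hpos : ∀ v : Int, v ∈ l → ∃ a : Nat, a < l.length ∧ l.getD a 0 = v := by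
      intro v hv
      obtain ⟨a, ha, hval⟩ := List.mem_iff_getElem.mp hv
      exact ⟨a, ha, by rw [List.getD_eq_getElem l 0 ha]; exact hval⟩
    obtain ⟨a0, ha0, hv0⟩ := hpos _ m0
    obtain ⟨a1, ha1, hv1⟩ := hpos _ m1
    obtain ⟨a2, ha2, hv2⟩ := hpos _ m2
    obtain ⟨a3, ha3, hv3⟩ := hpos _ m3
    -- strict monotonicity: a0 < a1 < a2 < a3, so a0 + 3 ≤ a3 < length
    have o01 : a0 < a1 := by
      by_contra hc
      have := sorted_getD_le l hsort a1 a0 (by omega) ha0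
      omega
    have o12 : a1 < a2 := by
      by_contra hc
      have := sorted_getD_le l hsort a2 a1 (by omega) ha1
      omega
    have o23 : a2 < a3 := by
      by_contra hc
      have := sorted_getD_le l hsort a3 a2 (by omega) ha2
      omega
    have hb3 : a0 + 3 < l.length := by omega
    have hlow : l.getD a0 0 + 3 ≤ l.getD (a0 + 3) 0 := by
      have := sorted_getD_add l hsort a0 3 (by omega)
      push_cast at this
      omega
    have hup : l.getD (a0 + 3) 0 ≤ l.getD a3 0 := sorted_getD_le l hsort (a0 + 3) a3 (by omega) ha3
    refine ⟨(a0 : Int), ?_, ?_⟩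
    · rw [PySem.List.mem_pyRange_one]
      omega
    · rw [beq_iff_eq,
        show ((a0 : Int) + 3) = ((a0 + 3 : Nat) : Int) by push_cast; ring,
        PySem.List.pyGetD_natCast, PySem.List.pyGetD_natCast]
      omega

-- B's cols equals A's headD expression in all cases
lemma cols_eq (g : List (List Int)) :
    (if g.isEmpty then (0 : Int) else ((g.headD []).length : Int)) = ((g.headD []).length : Int) := by
  cases g <;> simp

-- ===== VERDICT (by name: the statement is the Claim_ definition above) =====
theorem is_align4_spec : Claim_equal_is_align4 := by
  intro grille lc p _ _
  unfold Spec_is_align4 is_align4 is_align4_alt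
  simp only [cols_eq]
  rw [loopA_eq_loopT, filterA_eq_filterB, idxs_eq_pos, Bool.eq_iff_iff,
    loopT_zero_iff, idx_iff]
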